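-- pv_equiv track=rewrite | github.com/ensookim/algorithm | SW/22574.py | maxff
-- ===== SOURCE A (Python) =====
-- def maxff(sel,boom):
--     step= 0
--     for i in range(1,sel+1):
--         if step+i == boom:
--             continue
--         else:
--             step+=i
--
--     return step
-- ===== SOURCE B (Python) =====
-- def maxff(sel, boom):
--     # closed form: total = T(sel); the loop in A skips at most one add, namely
--     # the unique k with T(k) == boom (1 <= k <= sel), because after that skip
--     # every later partial sum is T(i)-k which can never equal boom again.
--     if sel < 1:
--         return 0
--     total = sel * (sel + 1) // 2
--     k, t = 1, 1          # t == T(k)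
--     while t < boom and k < sel:
--         k += 1
--         t += k
--     return total - k if t == boom else total
-- ===== Notes on version B (the rewrite author's own statement) =====
-- stated objective: faster
-- what changed: Replaces the O(sel) accumulate-and-skip loop by the closed-form triangular total T(sel) minus k when boom is the k-th triangular number with k <= sel, found by a short search that stops at min(sel, ~sqrt(2*boom)) steps.
import Mathlib
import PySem

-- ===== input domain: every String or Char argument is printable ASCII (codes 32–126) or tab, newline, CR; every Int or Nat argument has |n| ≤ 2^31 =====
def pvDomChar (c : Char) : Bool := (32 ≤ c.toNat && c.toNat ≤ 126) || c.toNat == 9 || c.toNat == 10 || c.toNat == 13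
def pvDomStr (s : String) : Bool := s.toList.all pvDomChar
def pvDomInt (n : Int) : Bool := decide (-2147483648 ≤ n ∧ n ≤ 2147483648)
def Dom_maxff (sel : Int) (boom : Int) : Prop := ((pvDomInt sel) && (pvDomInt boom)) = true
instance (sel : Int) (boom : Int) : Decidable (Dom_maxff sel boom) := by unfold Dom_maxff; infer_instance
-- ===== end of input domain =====

-- B replaces A's O(sel) accumulate-and-skip loop by the triangular total minus the
-- unique triangular index hitting boom (objective: faster, measured).

-- ===== PORT A =====
def maxff (sel : Int) (boom : Int) : Int :=
  (PySem.List.pyRange 1 (sel + 1) 1).foldl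
    (fun step i => if step + i = boom then step else step + i) 0

-- ===== PORT B =====
-- the 'while t < boom and k < sel' loop of Source B; fuel = sel - k encodes 'k < sel'
def maxffLoopB : Nat → Int → Int → Int → Int × Int
  | 0, k, t, _ => (k, t)
  | f + 1, k, t, boom => if t < boom then maxffLoopB f (k + 1) (t + (k + 1)) boom else (k, t)

def maxff_alt (sel : Int) (boom : Int) : Int :=
  if sel < 1 then 0
  else
    let total := PySem.Int.floordiv (sel * (sel + 1)) 2
    let kt := maxffLoopB (sel - 1).toNat 1 1 boom
    if kt.2 = boom then total - kt.1 else total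

-- ===== PRECONDITION & SPEC =====
def Spec_maxff (sel : Int) (boom : Int) (out : Int) : Prop := out = maxff_alt sel boom
instance (sel : Int) (boom : Int) (out : Int) : Decidable (Spec_maxff sel boom out) := by unfold Spec_maxff; infer_instance

-- ===== CLAIM (what is proved, stated in full; the proofs are below) =====
def Claim_equal_maxff : Prop := ∀ (sel : Int) (boom : Int), Dom_maxff sel boom → Spec_maxff sel boom (maxff sel boom)

-- ===== LEMMAS AND PROOFS =====

-- T(n), the n-th triangular number
def tri : Nat → Int
  | 0 => 0
  | n + 1 => tri n + (n + 1)

-- A's loop after n iterations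
def stepA (b : Int) : Nat → Int
  | 0 => 0
  | n + 1 => if stepA b n + (n + 1) = b then stepA b n else stepA b n + (n + 1)

-- the amount A skipped among the first n iterations (0 if none)
def skipA (b : Int) : Nat → Int
  | 0 => 0
  | n + 1 => if skipA b n = 0 ∧ tri (n + 1) = b then (n + 1) else skipA b n

theorem tri_strictMono {m n : Nat} (h : m < n) : tri m < tri n := by
  induction n with
  | zero => omega
  | succ n ih =>
    rcases Nat.lt_succ_iff_lt_or_eq.mp h with h' | h'
    · have := ih h'; simp [tri]; omega
    · subst h'; simp only [tri]; omega

theorem tri_inj {m n : Nat} (h : tri m = tri n) : m = n := by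
  rcases Nat.lt_trichotomy m n with h' | h' | h'
  · exact absurd h (by have := tri_strictMono h'; omega)
  · exact h'
  · exact absurd h (by have := tri_strictMono h'; omega)

-- skipA is 0 (and nothing in [1,n] hits b) or it is the unique hit k ∈ [1,n]
theorem skipA_cases (b : Int) (n : Nat) :
    (skipA b n = 0 ∧ ∀ k, 1 ≤ k → k ≤ n → tri k ≠ b) ∨
    (∃ k, 1 ≤ k ∧ k ≤ n ∧ tri k = b ∧ skipA b n = (k : Int)) := by
  induction n with
  | zero =>
    left; exact ⟨rfl, fun k h1 h2 => by omega⟩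
  | succ n ih =>
    rcases ih with ⟨h0, hnone⟩ | ⟨k, hk1, hk2, hkb, hks⟩
    · by_cases hb : tri (n + 1) = b
      · right; exact ⟨n + 1, by omega, le_refl _, hb, by simp [skipA, h0, hb]⟩
      · left
        refine ⟨by simp [skipA, h0, hb], fun k h1 h2 => ?_⟩
        rcases Nat.lt_succ_iff_lt_or_eq.mp (Nat.lt_succ_of_le h2) with h' | h'
        · exact hnone k h1 (by omega)
        · subst h'; exact hb
    · right
      refine ⟨k, hk1, by omega, hkb, ?_⟩
      simp only [skipA, hks]
      rw [if_neg]; rintro ⟨hc, -⟩; omega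

theorem stepA_eq (b : Int) (n : Nat) : stepA b n = tri n - skipA b n := by
  induction n with
  | zero => simp [stepA, tri, skipA]
  | succ n ih =>
    rcases skipA_cases b n with ⟨h0, hnone⟩ | ⟨k, hk1, hk2, hkb, hks⟩
    · by_cases hb : tri (n + 1) = b
      · have hcond : stepA b n + ((n : Int) + 1) = b := by
          rw [ih, h0]; simp only [tri] at hb; omega
        have hskip : skipA b (n + 1) = ((n : Int) + 1) := by
          simp only [skipA, if_pos (And.intro h0 hb)]
        simp only [stepA, hskip]
        rw [if_pos hcond, ih, h0]
        simp only [tri] at hb ⊢; omega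
      · have hcond : ¬ (stepA b n + ((n : Int) + 1) = b) := by
          rw [ih, h0]; simp only [tri] at hb; omega
        have hskip : skipA b (n + 1) = skipA b n := by
          simp only [skipA, if_neg (show ¬ (skipA b n = 0 ∧ tri (n + 1) = b) from fun h => hb h.2)]
        simp only [stepA, hskip]
        rw [if_neg hcond, ih, h0]
        simp only [tri]; omega
    · -- a skip already happened at k ≤ n; it cannot happen again
      have hne : skipA b n ≠ 0 := by rw [hks]; exact_mod_cast (by omega : (k : Int) ≠ 0)
      have hmono : tri k + ((k : Int) + 1) ≤ tri n + ((n : Int) + 1) := by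
        have h2 : tri (k + 1) ≤ tri (n + 1) := by
          rcases Nat.eq_or_lt_of_le (show k + 1 ≤ n + 1 by omega) with h | h
          · rw [h]
          · exact le_of_lt (tri_strictMono h)
        simp only [tri] at h2; exact h2
      have hcond : ¬ (stepA b n + ((n : Int) + 1) = b) := by
        rw [ih, hks, ← hkb]; omega
      have hskip : skipA b (n + 1) = (k : Int) := by
        simp only [skipA, hks]
        rw [if_neg]; rintro ⟨hc, -⟩; omega
      simp only [stepA, hskip]
      rw [if_neg hcond, ih, hks]
      simp only [tri]; omega

-- A's fold equals the structural recursion stepA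
theorem foldA_eq (b : Int) (n : Nat) :
    (PySem.List.pyRange 1 ((n : Int) + 1) 1).foldl
      (fun step i => if step + i = b then step else step + i) 0 = stepA b n := by
  induction n with
  | zero => simp [PySem.List.pyRange_one_eq_nil, stepA]
  | succ n ih =>
    rw [show ((n + 1 : Nat) : Int) + 1 = ((n : Int) + 1) + 1 by push_cast; ring,
      PySem.List.pyRange_one_succ_right (by omega), List.foldl_append, ih]
    simp only [List.foldl, stepA]

theorem maxff_eq_stepA (sel b : Int) : maxff sel b = stepA b sel.toNat := by
  unfold maxff
  by_cases h : sel ≤ 0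
  · rw [PySem.List.pyRange_one_eq_nil (by omega)]
    have h0 : sel.toNat = 0 := by omega
    simp [h0, stepA]
  · obtain ⟨n, rfl⟩ : ∃ n : Nat, sel = (n : Int) := ⟨sel.toNat, by omega⟩
    simp only [Int.toNat_natCast]
    exact foldA_eq b n

-- B's loop: starting at index m with t = tri m, it returns the first index whose
-- triangular number reaches b, capped at m + fuel
theorem maxffLoopB_spec (fuel : Nat) : ∀ (m : Nat) (b : Int), 1 ≤ m →
    ∃ m' : Nat, maxffLoopB fuel (m : Int) (tri m) b = ((m' : Int), tri m') ∧
      m ≤ m' ∧ m' ≤ m + fuel ∧ (∀ j, m ≤ j → j < m' → tri j < b) ∧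
      (tri m' < b → m' = m + fuel) := by
  induction fuel with
  | zero =>
    intro m b _
    exact ⟨m, rfl, le_refl _, by omega, fun j h1 h2 => by omega, fun _ => by omega⟩
  | succ f ih =>
    intro m b hm
    by_cases hlt : tri m < b
    · obtain ⟨m', heq, h1, h2, h3, h4⟩ := ih (m + 1) b (by omega)
      refine ⟨m', ?_, by omega, by omega, ?_, fun h => by have := h4 h; omega⟩
      · simp only [maxffLoopB, if_pos hlt]
        have e1 : tri m + ((m : Int) + 1) = tri (m + 1) := by simp [tri]
        have e2 : (m : Int) + 1 = ((m + 1 : Nat) : Int) := by push_cast; ring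
        rw [e1, e2]; exact heq
      · intro j hj1 hj2
        rcases Nat.eq_or_lt_of_le hj1 with h | h
        · subst h; exact hlt
        · exact h3 j h hj2
    · exact ⟨m, by simp [maxffLoopB, hlt], le_refl _, by omega,
        fun j h1 h2 => by omega, fun h => absurd h hlt⟩

theorem tri_double (n : Nat) : 2 * tri n = (n : Int) * (n + 1) := by
  induction n with
  | zero => simp [tri]
  | succ n ih => simp [tri]; push_cast at ih; ring_nf; ring_nf at ih; omega

theorem floordiv_tri (n : Nat) : PySem.Int.floordiv ((n : Int) * ((n : Int) + 1)) 2 = tri n := by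
  rw [← tri_double]
  simp [PySem.Int.floordiv]

-- ===== VERDICT (by name: the statement is the Claim_ definition above) =====
theorem maxff_spec : Claim_equal_maxff := by
  unfold Claim_equal_maxff
  intro sel boom _
  unfold Spec_maxff maxff_alt
  rw [maxff_eq_stepA, stepA_eq]
  by_cases h : sel < 1
  · have h0 : sel.toNat = 0 := by omega
    simp [if_pos h, h0, tri, skipA]
  · rw [if_neg h]
    obtain ⟨n, rfl⟩ : ∃ n : Nat, sel = (n : Int) := ⟨sel.toNat, by omega⟩
    have hn1 : 1 ≤ n := by omega
    simp only [Int.toNat_natCast]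
    obtain ⟨m', heq, h1, h2, h3, h4⟩ := maxffLoopB_spec (((n : Int)) - 1).toNat 1 boom le_rfl
    have hfuel : 1 + (((n : Int)) - 1).toNat = n := by omega
    rw [hfuel] at h2 h4
    rw [show tri 1 = 1 from by simp [tri]] at heq
    push_cast at heq
    rw [heq, floordiv_tri]
    split_ifs with hb
    · -- hit: tri m' = boom, so skipA n boom = m'
      have hb' : tri m' = boom := hb
      show tri n - skipA boom n = tri n - (m' : Int)
      rcases skipA_cases boom n with ⟨h0, hnone⟩ | ⟨k, hk1, hk2, hkb, hks⟩
      · exact absurd hb' (hnone m' h1 h2)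
      · rw [hks, tri_inj (hkb.trans hb'.symm)]
    · -- no hit: skipA n boom = 0
      have hb' : tri m' ≠ boom := hb
      show tri n - skipA boom n = tri n
      rcases skipA_cases boom n with ⟨h0, _⟩ | ⟨k, hk1, hk2, hkb, hks⟩
      · rw [h0]; ring
      · exfalso
        rcases Nat.lt_trichotomy k m' with hlt | hekm | hgt
        · exact absurd hkb (by have := h3 k hk1 hlt; omega)
        · exact hb' (hekm ▸ hkb)
        · rcases lt_trichotomy (tri m') boom with hm | hm | hm
          · have := h4 hm; omega
          · exact hb' hm
          · have := tri_strictMono hgt; omega
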